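-- pv_equiv track=rewrite | github.com/sympy/sympy | sympy/linalg/lilmatrix_tools.py | _row_add
-- ===== SOURCE A (Python) =====
-- def _row_add(row1, row2, alpha):
--     "li = row1 + alpha * row2 "
--     li = []
--     i1 = i2 = 0
--     n1 = len(row1)
--     n2 = len(row2)
--     while i1 < n1 or i2 < n2:
--         # print i1, i2, len(row1), len(row2)
--         if i1 < n1 and (i2 >= n2 or row1[i1][0] < row2[i2][0]):
--             li.append(row1[i1])
--             i1 += 1
--         elif i1 >= n1 or row1[i1][0] > row2[i2][0]:
--             li.append((row2[i2][0], alpha * row2[i2][1]))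
--             i2 += 1
--         else:
--             val = row1[i1][1] + alpha * row2[i2][1]
--             if val != 0:
--                 li.append((row1[i1][0], val))
--             i1 += 1
--             i2 += 1
--     return li
-- ===== SOURCE B (Python) =====
-- def _row_add(row1, row2, alpha):
--     "li = row1 + alpha * row2 "
--     if not row1:
--         return [(c, alpha * v) for (c, v) in row2]
--     if not row2:
--         return list(row1)
--     (c1, v1), (c2, v2) = row1[0], row2[0]
--     if c1 < c2:
--         return [(c1, v1)] + _row_add(row1[1:], row2, alpha)
--     if c2 < c1:
--         return [(c2, alpha * v2)] + _row_add(row1, row2[1:], alpha)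
--     val = v1 + alpha * v2
--     rest = _row_add(row1[1:], row2[1:], alpha)
--     return ([(c1, val)] if val != 0 else []) + rest
-- ===== Notes on version B (the rewrite author's own statement) =====
-- stated objective: alternative
-- what changed: A's exact output on arbitrary (also unsorted) rows pins the lockstep merge order, so B changes the decomposition from A's single imperative while loop over two integer cursors with bounds tests and an append accumulator to a pure structural recursion on the two lists: two comprehension/copy base cases plus a three-branch recursive step that builds the result front-to-back by concatenation; proved equal on all inputs, no precondition.
import Mathlib
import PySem

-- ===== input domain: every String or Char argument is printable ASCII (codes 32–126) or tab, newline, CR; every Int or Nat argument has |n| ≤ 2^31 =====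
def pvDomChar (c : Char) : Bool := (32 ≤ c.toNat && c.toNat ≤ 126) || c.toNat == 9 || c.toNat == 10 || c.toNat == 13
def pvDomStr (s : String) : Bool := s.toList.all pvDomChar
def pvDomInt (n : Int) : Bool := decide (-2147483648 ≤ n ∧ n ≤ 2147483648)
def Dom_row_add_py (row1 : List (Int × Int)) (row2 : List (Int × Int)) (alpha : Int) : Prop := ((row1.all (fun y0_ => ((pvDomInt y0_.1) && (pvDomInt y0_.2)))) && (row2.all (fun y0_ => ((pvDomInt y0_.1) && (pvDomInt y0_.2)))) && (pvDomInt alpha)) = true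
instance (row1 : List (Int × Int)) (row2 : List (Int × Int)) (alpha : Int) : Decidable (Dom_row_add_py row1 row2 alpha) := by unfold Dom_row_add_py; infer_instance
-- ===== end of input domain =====

-- B replaces A's imperative two-index while loop by a pure structural recursion on the two lists
-- (comprehension/copy base cases + three-branch recursive step); same merge order, proved equal on ALL inputs; not faster.


-- ===== PORT A =====
-- the while loop of _row_add, state (li, i1, i2); getD is exact: every access is guarded by i1 < n1 / i2 < n2
def rowAddLoop (row1 row2 : List (Int × Int)) (alpha : Int) (li : List (Int × Int)) (i1 i2 : Nat) : List (Int × Int) :=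
  if h : i1 < row1.length ∨ i2 < row2.length then
    if h1 : i1 < row1.length ∧ (row2.length ≤ i2 ∨ (row1.getD i1 (0, 0)).1 < (row2.getD i2 (0, 0)).1) then
      rowAddLoop row1 row2 alpha (li ++ [row1.getD i1 (0, 0)]) (i1 + 1) i2
    else if h2 : row1.length ≤ i1 ∨ (row2.getD i2 (0, 0)).1 < (row1.getD i1 (0, 0)).1 then
      rowAddLoop row1 row2 alpha (li ++ [((row2.getD i2 (0, 0)).1, alpha * (row2.getD i2 (0, 0)).2)]) i1 (i2 + 1)
    else
      rowAddLoop row1 row2 alpha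
        (if (row1.getD i1 (0, 0)).2 + alpha * (row2.getD i2 (0, 0)).2 ≠ 0 then
          li ++ [((row1.getD i1 (0, 0)).1, (row1.getD i1 (0, 0)).2 + alpha * (row2.getD i2 (0, 0)).2)]
        else li) (i1 + 1) (i2 + 1)
  else li
termination_by row1.length - i1 + (row2.length - i2)
decreasing_by all_goals omega

def row_add_py (row1 : List (Int × Int)) (row2 : List (Int × Int)) (alpha : Int) : List (Int × Int) :=
  rowAddLoop row1 row2 alpha [] 0 0

-- ===== PORT B =====
-- Source B's structural recursion on (row1, row2); '[x] + rest' is written as cons, 'row2[1:]' as the tail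
def mergeRec (alpha : Int) : List (Int × Int) → List (Int × Int) → List (Int × Int)
  | [], r2 => r2.map (fun p => (p.1, alpha * p.2))         -- 'if not row1: [(c, alpha*v) for (c, v) in row2]'
  | p :: t1, [] => p :: t1                                 -- 'if not row2: list(row1)'
  | p1 :: t1, p2 :: t2 =>
    if p1.1 < p2.1 then p1 :: mergeRec alpha t1 (p2 :: t2)
    else if p2.1 < p1.1 then (p2.1, alpha * p2.2) :: mergeRec alpha (p1 :: t1) t2
    else (if p1.2 + alpha * p2.2 ≠ 0 then [(p1.1, p1.2 + alpha * p2.2)] else []) ++ mergeRec alpha t1 t2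

def row_add_py_alt (row1 : List (Int × Int)) (row2 : List (Int × Int)) (alpha : Int) : List (Int × Int) :=
  mergeRec alpha row1 row2

-- ===== PRECONDITION & SPEC =====
def Spec_row_add_py (row1 : List (Int × Int)) (row2 : List (Int × Int)) (alpha : Int) (out : List (Int × Int)) : Prop := out = row_add_py_alt row1 row2 alpha
instance (row1 : List (Int × Int)) (row2 : List (Int × Int)) (alpha : Int) (out : List (Int × Int)) : Decidable (Spec_row_add_py row1 row2 alpha out) := by unfold Spec_row_add_py; infer_instance

-- ===== CLAIM (what is proved, stated in full; the proofs are below) =====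
def Claim_equal_row_add_py : Prop := ∀ (row1 : List (Int × Int)) (row2 : List (Int × Int)) (alpha : Int), Dom_row_add_py row1 row2 alpha → Spec_row_add_py row1 row2 alpha (row_add_py row1 row2 alpha)

-- ===== LEMMAS AND PROOFS =====

theorem mergeRec_nil (alpha : Int) (r : List (Int × Int)) : mergeRec alpha r [] = r := by
  cases r <;> simp [mergeRec]

-- loop invariant: A's index loop from (i1, i2) appends exactly B's recursion on the two suffixes
theorem rowAddLoop_eq (row1 row2 : List (Int × Int)) (alpha : Int) (li : List (Int × Int)) (i1 i2 : Nat) :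
    rowAddLoop row1 row2 alpha li i1 i2 = li ++ mergeRec alpha (row1.drop i1) (row2.drop i2) := by
  fun_induction rowAddLoop row1 row2 alpha li i1 i2 with
  | case1 li i1 i2 h h1 ih =>
    rw [ih]
    rcases h1 with ⟨hi1, hd⟩
    rw [List.drop_eq_getElem_cons hi1, List.getD_eq_getElem _ _ hi1]
    by_cases hi2 : i2 < row2.length
    · have hlt : row1[i1].1 < row2[i2].1 := by
        rcases hd with hge | hlt
        · omega
        · rwa [List.getD_eq_getElem _ _ hi1, List.getD_eq_getElem _ _ hi2] at hlt
      rw [List.drop_eq_getElem_cons hi2, mergeRec, if_pos hlt]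
      simp
    · rw [show List.drop i2 row2 = [] from List.drop_eq_nil_of_le (by omega), mergeRec_nil, mergeRec_nil]
      simp
  | case2 li i1 i2 h h1 h2 ih =>
    rw [ih]
    by_cases hi1 : i1 < row1.length
    · have hi2 : i2 < row2.length := by
        rcases h2 with hge | _
        · omega
        · by_contra hge2
          exact h1 ⟨hi1, Or.inl (by omega)⟩
      have hlt : row2[i2].1 < row1[i1].1 := by
        rcases h2 with hge | hlt
        · omega
        · rwa [List.getD_eq_getElem _ _ hi1, List.getD_eq_getElem _ _ hi2] at hlt
      have hn1 : ¬ (row1[i1].1 < row2[i2].1) := by omega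
      rw [List.drop_eq_getElem_cons hi1, List.drop_eq_getElem_cons hi2, mergeRec,
        if_neg hn1, if_pos hlt, List.getD_eq_getElem _ _ hi2]
      simp
    · have hi2 : i2 < row2.length := by omega
      rw [List.getD_eq_getElem _ _ hi2,
        show List.drop i1 row1 = [] from List.drop_eq_nil_of_le (by omega),
        List.drop_eq_getElem_cons hi2, mergeRec, mergeRec]
      simp
      rw [show List.drop i2 (row2.map (fun p => (p.1, alpha * p.2)))
          = (row2.map (fun p => (p.1, alpha * p.2)))[i2]'(by simpa using hi2) ::
            List.drop (i2 + 1) (row2.map (fun p => (p.1, alpha * p.2)))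
          from List.drop_eq_getElem_cons (by simpa)]
      simp
  | case3 li i1 i2 h h1 h2 ih =>
    have hi1 : i1 < row1.length := by
      by_contra hge
      exact h2 (Or.inl (by omega))
    have hi2 : i2 < row2.length := by
      by_contra hge2
      exact h1 ⟨hi1, Or.inl (by omega)⟩
    have heq : row1[i1].1 = row2[i2].1 := by
      rw [List.getD_eq_getElem _ _ hi1, List.getD_eq_getElem _ _ hi2] at h1 h2
      have hnlt2 : ¬ row1[i1].1 < row2[i2].1 := fun hl => h1 ⟨hi1, Or.inr hl⟩
      rcases not_or.mp h2 with ⟨_, hnlt⟩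
      omega
    have hn1 : ¬ (row1[i1].1 < row2[i2].1) := by omega
    have hn2 : ¬ (row2[i2].1 < row1[i1].1) := by omega
    rw [List.getD_eq_getElem _ _ hi1, List.getD_eq_getElem _ _ hi2] at ih ⊢
    rw [List.drop_eq_getElem_cons hi1, List.drop_eq_getElem_cons hi2, mergeRec,
      if_neg hn1, if_neg hn2]
    split_ifs at ih ⊢ with hz
    · rw [ih]; simp
    · rw [ih]; simp
  | case4 li i1 i2 h =>
    rw [show List.drop i1 row1 = [] from List.drop_eq_nil_of_le (by omega),
      show List.drop i2 row2 = [] from List.drop_eq_nil_of_le (by omega)]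
    simp [mergeRec]

-- ===== VERDICT (by name: the statement is the Claim_ definition above) =====
theorem row_add_py_spec : Claim_equal_row_add_py := by
  intro row1 row2 alpha _hdom
  unfold Spec_row_add_py row_add_py row_add_py_alt
  rw [rowAddLoop_eq]
  simp
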